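-- pv_equiv track=rewrite | github.com/LYcheck/competitive-programming | LeetCode/Length of the Longest Alphabetical Continuous Substring (M).py | longestContinuousSubstring
-- ===== SOURCE A (Python) =====
-- def longestContinuousSubstring(s: str) -> int:
--     abc = "abcdefghijklmnopqrstuvwxyz"
--     if not s: return 0
--     res = 1
--
--     for i in range(len(abc)):
--         for j in range(i+1, len(abc)):
--             temp = abc[i:j+1]
--             if temp in s:
--                 res = max(res, len(temp))
--
--     return res
-- ===== SOURCE B (Python) =====
-- def longestContinuousSubstring(s: str) -> int:
--     if not s:
--         return 0
--     res = 1
--     cur = 1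
--     prev = s[0]
--     for c in s[1:]:
--         if 'a' <= prev <= 'y' and ord(c) == ord(prev) + 1:
--             cur += 1
--             if cur > res:
--                 res = cur
--         else:
--             cur = 1
--         prev = c
--     return res
-- ===== Notes on version B (the rewrite author's own statement) =====
-- stated objective: faster
-- what changed: Replaces the 325-fold scan that tests every alphabet slice for membership in s with a single left-to-right pass tracking the current consecutive lowercase run length.
import Mathlib
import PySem

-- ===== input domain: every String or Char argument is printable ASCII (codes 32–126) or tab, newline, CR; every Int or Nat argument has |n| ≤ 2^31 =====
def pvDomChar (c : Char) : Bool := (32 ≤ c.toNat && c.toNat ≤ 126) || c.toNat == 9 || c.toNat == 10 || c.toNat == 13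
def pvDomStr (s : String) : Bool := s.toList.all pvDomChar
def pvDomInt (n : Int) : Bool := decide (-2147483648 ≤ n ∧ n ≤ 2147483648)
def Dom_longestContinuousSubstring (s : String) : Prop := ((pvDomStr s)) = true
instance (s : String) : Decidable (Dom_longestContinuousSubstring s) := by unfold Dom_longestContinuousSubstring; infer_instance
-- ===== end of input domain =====

-- B replaces A's scan over all 325 alphabet slices (each tested for membership in s) by a
-- single left-to-right pass tracking the current consecutive-lowercase run length (objective: faster).

-- ===== PORT A =====
def longestContinuousSubstring (s : String) : Int :=
  let abc := "abcdefghijklmnopqrstuvwxyz"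
  if s = "" then 0 else
  (PySem.List.pyRange 0 (PySem.Str.len abc) 1).foldl (fun res i =>
    (PySem.List.pyRange (i + 1) (PySem.Str.len abc) 1).foldl (fun res j =>
      let temp := PySem.Str.slice abc (some i) (some (j + 1))
      if PySem.Str.isIn temp s then max res (PySem.Str.len temp) else res) res) 1

-- ===== PORT B =====
-- helper for B: the Python test  'a' <= prev <= 'y' and ord(c) == ord(prev) + 1
def bCond (p c : Char) : Bool := 'a' ≤ p && p ≤ 'y' && c.toNat == p.toNat + 1

def longestContinuousSubstring_alt (s : String) : Int :=
  match s.toList with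
  | [] => 0
  | c0 :: rest =>
    (rest.foldl (fun (st : Char × Int × Int) c =>
      if bCond st.1 c then (c, st.2.1 + 1, max st.2.2 (st.2.1 + 1))
      else (c, 1, st.2.2)) (c0, 1, 1)).2.2

-- ===== PRECONDITION & SPEC =====
def Spec_longestContinuousSubstring (s : String) (out : Int) : Prop := out = longestContinuousSubstring_alt s
instance (s : String) (out : Int) : Decidable (Spec_longestContinuousSubstring s out) := by unfold Spec_longestContinuousSubstring; infer_instance

-- ===== CLAIM (what is proved, stated in full; the proofs are below) =====
def Claim_equal_longestContinuousSubstring : Prop := ∀ (s : String), Dom_longestContinuousSubstring s → Spec_longestContinuousSubstring s (longestContinuousSubstring s)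

-- ===== LEMMAS AND PROOFS =====

-- the alphabet as a list of chars (proof-side name for A's literal)
def abcL : List Char := "abcdefghijklmnopqrstuvwxyz".toList

-- the length (as chars) of the longest consecutive-lowercase run starting at c and continuing into l
def runFrom (c : Char) (l : List Char) : Nat :=
  match l with
  | [] => 1
  | d :: t => if bCond c d then 1 + runFrom d t else 1

-- the longest consecutive-lowercase run anywhere in l (0 for [])
def best (l : List Char) : Nat :=
  match l with
  | [] => 0
  | c :: t => max (runFrom c t) (best t)

-- a list whose adjacent elements satisfy bCond everywhere
def ChainP (r : List Char) : Prop := ∀ k, k + 1 < r.length → bCond (r.getD k 'a') (r.getD (k + 1) 'a')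

theorem bCond_spec (p c : Char) : bCond p c = true ↔ 97 ≤ p.toNat ∧ p.toNat ≤ 121 ∧ c.toNat = p.toNat + 1 := by
  simp only [bCond, Bool.and_eq_true, decide_eq_true_eq, beq_iff_eq, Char.le_def,
    UInt32.le_iff_toNat_le]
  constructor
  · rintro ⟨⟨h1, h2⟩, h3⟩; exact ⟨h1, h2, h3⟩
  · rintro ⟨h1, h2, h3⟩; exact ⟨⟨h1, h2⟩, h3⟩

theorem runFrom_pos (c : Char) (l : List Char) : 1 ≤ runFrom c l := by
  cases l with
  | nil => simp [runFrom]
  | cons d t => simp only [runFrom]; split <;> omega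

theorem best_pos (l : List Char) (h : l ≠ []) : 1 ≤ best l := by
  cases l with
  | nil => exact absurd rfl h
  | cons c t => have := runFrom_pos c t; simp only [best]; omega

-- ========== generic foldl max lemmas ==========

theorem pv_le_foldl {α : Type} (h : Int → α → Int) (mono : ∀ r x, r ≤ h r x) :
    ∀ (l : List α) (init : Int), init ≤ l.foldl h init := by
  intro l
  induction l with
  | nil => intro init; simp
  | cons x t ih => intro init; exact le_trans (mono init x) (ih (h init x))

theorem pv_foldl_ub {α : Type} (h : Int → α → Int) (B : Int) :
    ∀ (l : List α) (init : Int), init ≤ B → (∀ r x, x ∈ l → r ≤ B → h r x ≤ B) →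
    l.foldl h init ≤ B := by
  intro l
  induction l with
  | nil => intro init h1 _; simpa using h1
  | cons x t ih =>
    intro init h1 h2
    exact ih (h init x) (h2 init x (by simp) h1)
      (fun r y hy hr => h2 r y (by simp [hy]) hr)

theorem pv_foldl_lb {α : Type} (h : Int → α → Int) (mono : ∀ r x, r ≤ h r x) (v : Int) :
    ∀ (l : List α) (x : α), x ∈ l → (∀ r, v ≤ h r x) → ∀ init, v ≤ l.foldl h init := by
  intro l
  induction l with
  | nil => intro x hx; simp at hx
  | cons y t ih =>
    intro x hx hv init
    rcases List.mem_cons.mp hx with rfl | hx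
    · exact le_trans (hv init) (pv_le_foldl h mono t (h init x))
    · exact ih x hx hv (h init y)

-- ========== B equals best ==========

theorem foldB_inv : ∀ (l : List Char) (p : Char) (cur res : Int), 1 ≤ cur → cur ≤ res →
    (l.foldl (fun (st : Char × Int × Int) c =>
      if bCond st.1 c then (c, st.2.1 + 1, max st.2.2 (st.2.1 + 1))
      else (c, 1, st.2.2)) (p, cur, res)).2.2
    = max res (max (cur - 1 + (runFrom p l : Int)) (best l)) := by
  intro l
  induction l with
  | nil => intro p cur res h1 h2; simp [runFrom, best]; omega
  | cons d t ih =>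
    intro p cur res h1 h2
    simp only [List.foldl_cons]
    by_cases hc : bCond p d
    · simp only [hc, if_true]
      rw [ih d (cur + 1) (max res (cur + 1)) (by omega) (by omega)]
      have hr := runFrom_pos d t
      simp only [runFrom, best, hc, if_true]
      push_cast
      omega
    · simp only [hc, Bool.false_eq_true, if_false]
      rw [ih d 1 res (by omega) (by omega)]
      simp only [runFrom, best, hc, Bool.false_eq_true, if_false]
      push_cast
      omega

theorem altB_eq_best (s : String) : longestContinuousSubstring_alt s = (best s.toList : Int) := by
  unfold longestContinuousSubstring_alt
  cases hs : s.toList with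
  | nil => simp [best]
  | cons c0 rest =>
    simp only
    rw [foldB_inv rest c0 1 1 (by omega) (by omega)]
    have h1 := runFrom_pos c0 rest
    simp only [best]
    push_cast
    omega

-- ========== chain facts ==========

theorem chain_shift (c : Char) (r : List Char) (h : ChainP (c :: r)) : ChainP r := by
  intro k hk
  have := h (k + 1) (by simp at hk ⊢; omega)
  simpa using this

theorem runFrom_ge_of_chain : ∀ (r : List Char) (c : Char) (t : List Char),
    ChainP (c :: r) → r.length + 1 ≤ runFrom c (r ++ t) := by
  intro r
  induction r with
  | nil => intro c t _; simpa using runFrom_pos c t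
  | cons d r' ih =>
    intro c t hch
    have h0 : bCond c d := by simpa using hch 0 (by simp)
    simp only [List.cons_append, runFrom, h0, if_true, List.length_cons]
    have := ih d t (chain_shift c _ hch)
    omega

theorem best_append : ∀ (pre : List Char) (c : Char) (t : List Char),
    runFrom c t ≤ best (pre ++ c :: t) := by
  intro pre
  induction pre with
  | nil => intro c t; simp [best]
  | cons p pre' ih =>
    intro c t
    have := ih c t
    simp only [List.cons_append, best]
    omega

theorem infix_le_best (r cs : List Char) (hne : r ≠ []) (hch : ChainP r) (hinf : r <:+: cs) :
    r.length ≤ best cs := by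
  obtain ⟨pre, post, rfl⟩ := hinf
  cases r with
  | nil => exact absurd rfl hne
  | cons c rs =>
    have h1 := runFrom_ge_of_chain rs c post hch
    have h2 := best_append pre c (rs ++ post)
    simp only [List.cons_append, List.append_assoc] at h2 ⊢
    simp only [List.length_cons]
    omega

theorem runFrom_split : ∀ (t : List Char) (c : Char),
    ∃ r t', t = r ++ t' ∧ runFrom c t = r.length + 1 ∧ ChainP (c :: r) := by
  intro t
  induction t with
  | nil =>
    intro c
    exact ⟨[], [], rfl, by simp [runFrom], by intro k hk; simp at hk⟩
  | cons d t' ih =>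
    intro c
    by_cases hc : bCond c d
    · obtain ⟨r', tt, ht, hr, hch⟩ := ih d
      refine ⟨d :: r', tt, by simp [ht], ?_, ?_⟩
      · simp [runFrom, hc, hr]; omega
      · intro k hk
        cases k with
        | zero => simpa using hc
        | succ k =>
          have := hch k (by simp at hk ⊢; omega)
          simpa using this
    · exact ⟨[], d :: t', rfl, by simp [runFrom, hc], by intro k hk; simp at hk⟩

theorem chain_vals : ∀ (r : List Char) (c : Char), ChainP (c :: r) →
    ∀ k, k < r.length + 1 → ((c :: r).getD k 'a').toNat = c.toNat + k := by
  intro r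
  induction r with
  | nil =>
    intro c _ k hk
    have hk0 : k = 0 := by simp at hk; omega
    subst hk0; simp
  | cons d r' ih =>
    intro c hch k hk
    have h0 : bCond c d := by simpa using hch 0 (by simp)
    have hd := (bCond_spec c d).mp h0
    cases k with
    | zero => simp
    | succ k =>
      have := ih d (chain_shift c _ hch) k (by simp at hk; omega)
      simp only [List.getD_cons_succ] at this ⊢
      omega

theorem best_spec : ∀ (l : List Char), l ≠ [] → ∃ pre c t, l = pre ++ c :: t ∧ best l = runFrom c t := by
  intro l
  induction l with
  | nil => intro h; exact absurd rfl h
  | cons c t ih =>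
    intro _
    by_cases h : best t ≤ runFrom c t
    · exact ⟨[], c, t, rfl, by simp [best]; omega⟩
    · have htne : t ≠ [] := by
        intro h0; rw [h0] at h; simp [best] at h
      obtain ⟨pre', c', t', h1, h2⟩ := ih htne
      exact ⟨c :: pre', c', t', by simp [h1], by simp [best]; omega⟩

-- ========== abc facts ==========

theorem abc_len : abcL.length = 26 := by decide

theorem abc_getD : ∀ m, m < 26 → (abcL.getD m 'a').toNat = 97 + m := by decide

-- ========== A equals best ==========

theorem string_ne_empty_toList (s : String) (h : s ≠ "") : s.toList ≠ [] := by
  intro hl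
  apply h
  have : s.toList = ("" : String).toList := by simpa using hl
  exact String.toList_inj.mp this

theorem abc26 : PySem.Str.len "abcdefghijklmnopqrstuvwxyz" = 26 := by decide

set_option maxHeartbeats 2000000 in
set_option maxRecDepth 8192 in
theorem A_eq_best (s : String) (hs : s ≠ "") : longestContinuousSubstring s = (best s.toList : Int) := by
  have hcs : s.toList ≠ [] := string_ne_empty_toList s hs
  have hbp : 1 ≤ best s.toList := best_pos _ hcs
  unfold longestContinuousSubstring
  simp only [hs, if_false, abc26]
  apply le_antisymm
  · -- upper bound: every slice that is in s is a chain infix, so its length ≤ best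
    apply pv_foldl_ub
    · exact_mod_cast hbp
    · intro r i hi hr
      apply pv_foldl_ub
      · exact hr
      · intro r' j hj hr'
        split
        next hin =>
          have hi' := PySem.List.mem_pyRange_one.mp hi
          have hj' := PySem.List.mem_pyRange_one.mp hj
          set temp := PySem.Str.slice "abcdefghijklmnopqrstuvwxyz" (some i) (some (j + 1)) with htemp
          clear_value temp
          have htl : temp.toList = (abcL.drop i.toNat).take ((j + 1).toNat - i.toNat) := by
            rw [htemp]
            unfold abcL
            simp only [PySem.Str.slice, String.toList_ofList, PySem.Chars.slice_eq_listSlice]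
            rw [PySem.List.slice_toNat _ (by omega) (by omega)]
          set a := i.toNat with ha
          set b := (j + 1).toNat with hb
          have hab : a + 2 ≤ b ∧ b ≤ 26 := by omega
          have hlen : temp.toList.length = b - a := by
            rw [htl]; simp [abc_len]; omega
          have hgd : ∀ k, k < b - a → (temp.toList.getD k 'a').toNat = 97 + a + k := by
            intro k hk
            rw [htl]
            rw [List.getD_eq_getElem _ 'a' (by simp [abc_len]; omega)]
            rw [List.getElem_take, List.getElem_drop]
            rw [← List.getD_eq_getElem _ 'a' (by rw [abc_len]; omega)]
            rw [abc_getD (a + k) (by omega)]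
            omega
          have hch : ChainP temp.toList := by
            intro k hk
            rw [hlen] at hk
            rw [bCond_spec]
            rw [hgd k (by omega), hgd (k + 1) (by omega)]
            omega
          have hinf : temp.toList <:+: s.toList := (PySem.Str.isIn_iff_infix temp s).mp hin
          have := infix_le_best temp.toList s.toList (by intro h; rw [h] at hlen; simp at hlen; omega) hch hinf
          rw [hlen] at this
          have hlt : PySem.Str.len temp = ((b - a : Nat) : Int) := by
            rw [PySem.Str.len_eq, hlen]
          rw [hlt]
          have : ((b - a : Nat) : Int) ≤ (best s.toList : Int) := by exact_mod_cast this
          omega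
        next => exact hr'
  · -- lower bound: the run achieving best is an alphabet slice occurring in s
    -- first: outer-step monotonicity
    have innerMono : ∀ (i : Int) (r : Int), r ≤ (PySem.List.pyRange (i + 1) 26 1).foldl (fun res j =>
        if PySem.Str.isIn (PySem.Str.slice "abcdefghijklmnopqrstuvwxyz" (some i) (some (j + 1))) s
        then max res (PySem.Str.len (PySem.Str.slice "abcdefghijklmnopqrstuvwxyz" (some i) (some (j + 1)))) else res) r := by
      intro i r
      apply pv_le_foldl
      intro r' j
      split <;> simp
    -- find the best run and realise it as an alphabet slice occurring in s
    obtain ⟨pre, c, t, hcs_eq, hbest⟩ := best_spec s.toList hcs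
    obtain ⟨r, t', ht, hrun, hch⟩ := runFrom_split t c
    by_cases hr0 : r.length = 0
    · -- the best run has length 1: the fold starts at 1
      have hb1 : best s.toList = 1 := by rw [hbest, hrun, hr0]
      rw [hb1]
      exact le_trans (by norm_num) (pv_le_foldl _ (fun res i => innerMono i res) _ 1)
    · -- the best run has length r.length + 1 ≥ 2
      have hc0 : bCond c (r.getD 0 'a') := by
        have := hch 0 (by simp; omega)
        simpa using this
      have hcbase := (bCond_spec _ _).mp hc0
      have hlast : c.toNat + r.length ≤ 122 := by
        have h1 := hch (r.length - 1) (by simp; omega)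
        have h3 := (bCond_spec _ _).mp h1
        have h4 := chain_vals r c hch (r.length - 1) (by omega)
        omega
      set a := c.toNat - 97 with ha
      have haL : a + (r.length + 1) ≤ 26 := by omega
      set i : Int := (a : Int) with hi
      set j : Int := ((a + r.length : Nat) : Int) with hj
      set temp := PySem.Str.slice "abcdefghijklmnopqrstuvwxyz" (some i) (some (j + 1)) with htemp
      clear_value temp
      have htl : temp.toList = (abcL.drop a).take (r.length + 1) := by
        rw [htemp]
        unfold abcL
        simp only [PySem.Str.slice, String.toList_ofList, PySem.Chars.slice_eq_listSlice]
        rw [PySem.List.slice_toNat _ (by rw [hi]; omega) (by rw [hj]; omega)]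
        have e1 : i.toNat = a := by rw [hi]; omega
        have e2 : (j + 1).toNat - i.toNat = r.length + 1 := by rw [hi, hj]; omega
        rw [e2, e1]
      have hlen : temp.toList.length = r.length + 1 := by
        rw [htl]
        simp [abc_len]
        omega
      have htemp_eq : temp.toList = c :: r := by
        apply List.ext_getElem
        · rw [hlen]; simp
        · intro k hk1 hk2
          apply Char.ext
          apply UInt32.toNat_inj.mp
          show temp.toList[k].toNat = (c :: r)[k].toNat
          rw [hlen] at hk1
          have hL : temp.toList[k] = abcL[a + k]'(by rw [abc_len]; omega) := by
            simp only [htl] at hk1 ⊢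
            rw [List.getElem_take, List.getElem_drop]
          rw [hL]
          rw [← List.getD_eq_getElem _ 'a' (by rw [abc_len]; omega), abc_getD (a + k) (by omega)]
          rw [← List.getD_eq_getElem _ 'a' (by simpa using hk2)]
          rw [chain_vals r c hch k (by omega)]
          omega
      have hinf : temp.toList <:+: s.toList := by
        rw [htemp_eq, hcs_eq, ht]
        exact ⟨pre, t', by simp⟩
      have hin : PySem.Str.isIn temp s = true := (PySem.Str.isIn_iff_infix temp s).mpr hinf
      have hlenI : PySem.Str.len temp = ((r.length + 1 : Nat) : Int) := by
        rw [PySem.Str.len_eq, hlen]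
      rw [hbest, hrun]
      apply pv_foldl_lb _ (fun res i => innerMono i res) _ _ i
        (PySem.List.mem_pyRange_one.mpr ⟨by omega, by omega⟩)
      intro res
      apply pv_foldl_lb _ (by intro r' j'; split <;> simp) _ _ j
        (PySem.List.mem_pyRange_one.mpr ⟨by rw [hi, hj]; omega, by rw [hj]; omega⟩)
      intro r'
      rw [← htemp]
      simp only [hin, if_true, hlenI]
      exact le_max_right _ _

-- ===== VERDICT (by name: the statement is the Claim_ definition above) =====
theorem longestContinuousSubstring_spec : Claim_equal_longestContinuousSubstring := by
  intro s _
  unfold Spec_longestContinuousSubstring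
  by_cases hs : s = ""
  · subst hs
    unfold longestContinuousSubstring longestContinuousSubstring_alt
    decide
  · rw [A_eq_best s hs, altB_eq_best]
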